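-- pv_equiv track=rewrite | github.com/humancipher/Programming_Contest | Programming_Contest/AtCoder/ABC/ABC_100-199/ABC_170-179/ABC_179/ABC_179_E.py | solve
-- ===== SOURCE A (Python) =====
-- def solve(N,X,M):
--     Loop = [X]
--     Loop_set = set(Loop)
--
--     for i in range(N):
--         X = X**2 % M
--         if X not in Loop_set:
--             Loop.append(X)
--             Loop_set.add(X)
--         else:
--             break
--
--     loop_st = 0
--     for i in range(len(Loop)):
--         if Loop[i] == (Loop[-1]**2 % M):
--             loop_st = i
--             break
--
--     loop_len = len(Loop) - loop_st
--     ans = sum(Loop[:loop_st])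
--     N -= loop_st
--     ans += (sum(Loop[loop_st:]) * (N // loop_len) + sum(Loop[loop_st:loop_st + (N % loop_len)]))
--     return ans
-- ===== SOURCE B (Python) =====
-- def solve(N, X, M):
--     # Floyd tortoise-and-hare cycle detection instead of storing the whole prefix.
--     def step(v):
--         return v * v % M
--
--     # Phase 1: detect a meeting point, capped at N steps of the slow pointer.
--     slow = X
--     fast = X
--     meet = None
--     for i in range(1, N + 1):
--         slow = step(slow)
--         fast = step(step(fast))
--         if slow == fast:
--             meet = i
--             break
--
--     if meet is None:
--         # No cycle reached within the first N terms: sum them directly.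
--         total = 0
--         v = X
--         for _ in range(N):
--             total += v
--             v = step(v)
--         return total
--
--     # Phase 2: find mu (start of the cycle) by walking from X and from the
--     # meeting point in lockstep.
--     p = X
--     q = slow
--     mu = 0
--     while p != q:
--         p = step(p)
--         q = step(q)
--         mu += 1
--
--     # Phase 3: find lam (cycle length) by walking once around from p.
--     lam = 1
--     v = step(p)
--     while v != p:
--         v = step(v)
--         lam += 1
--
--     # Assemble: tail sum, whole cycles, partial cycle -- capped at N terms.
--     tail_sum = 0
--     v = X
--     for _ in range(mu):
--         tail_sum += v
--         v = step(v)
--     cycle_sum = 0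
--     w = v
--     for _ in range(lam):
--         cycle_sum += w
--         w = step(w)
--     rem = N - mu
--     part = 0
--     w = v
--     for _ in range(rem % lam):
--         part += w
--         w = step(w)
--     return tail_sum + cycle_sum * (rem // lam) + part
-- ===== Notes on version B (the rewrite author's own statement) =====
-- stated objective: alternative
-- what changed: Replaces A's stored-prefix-plus-set cycle detection and linear rescan for the cycle start by Floyd's tortoise-and-hare in O(1) extra space: detect a meeting point (capped at N slow steps, falling back to a direct sum of the first N terms), derive mu and lambda by the two standard walks, then assemble tail sum + whole cycles + partial cycle.
-- outside the precondition, e.g. on solve(-3, 2, 5): A returns -6, B returns 0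
import Mathlib
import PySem

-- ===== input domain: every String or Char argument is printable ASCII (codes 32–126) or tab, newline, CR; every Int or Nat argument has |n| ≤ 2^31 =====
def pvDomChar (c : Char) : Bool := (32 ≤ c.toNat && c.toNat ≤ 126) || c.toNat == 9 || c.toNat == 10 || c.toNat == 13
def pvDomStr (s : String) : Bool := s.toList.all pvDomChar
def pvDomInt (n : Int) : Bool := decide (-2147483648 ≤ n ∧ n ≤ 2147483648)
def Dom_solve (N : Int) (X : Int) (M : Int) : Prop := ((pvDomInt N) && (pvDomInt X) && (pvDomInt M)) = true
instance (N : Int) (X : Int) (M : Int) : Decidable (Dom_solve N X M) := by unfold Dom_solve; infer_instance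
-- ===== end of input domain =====

-- B replaces A's stored-prefix cycle search by Floyd's tortoise-and-hare (O(1) extra space); same return value on the stated domain.

-- ===== PORT A =====
-- the first 'for i in range(N)' loop: extends Loop until a repeat or N iterations
def solveLoop1 (M : Int) : Nat → Int → List Int → PySem.Set Int → List Int
  | 0, _, Loop, _ => Loop
  | n+1, X, Loop, Lset =>
    if PySem.Int.mod (X ^ 2) M ∈ Lset then Loop
    else solveLoop1 M n (PySem.Int.mod (X ^ 2) M) (Loop ++ [PySem.Int.mod (X ^ 2) M])
      (PySem.Set.add Lset (PySem.Int.mod (X ^ 2) M))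

-- the 'for i in range(len(Loop))' scan for loop_st (0 if no hit)
def solveScan (t : Int) : List Int → Int → Int
  | [], _ => 0
  | y :: ys, i => if y = t then i else solveScan t ys (i + 1)

def solve (N : Int) (X : Int) (M : Int) : Int :=
  let Loop := solveLoop1 M N.toNat X [X] (PySem.Set.ofList [X])
  let last := (PySem.List.pyGet? Loop (-1)).getD 0
  let loop_st := solveScan (PySem.Int.mod (last ^ 2) M) Loop 0
  let loop_len : Int := (Loop.length : Int) - loop_st
  let ans := (PySem.List.slice Loop none (some loop_st)).sum
  let N' := N - loop_st
  ans + ((PySem.List.slice Loop (some loop_st) none).sum * PySem.Int.floordiv N' loop_len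
    + (PySem.List.slice Loop (some loop_st) (some (loop_st + PySem.Int.mod N' loop_len))).sum)

-- ===== PORT B =====
def altStep (M : Int) (v : Int) : Int := PySem.Int.mod (v * v) M

-- phase 1: tortoise-and-hare, capped at N slow steps; returns (meet index, meet value)
def altPhase1 (M : Int) : Nat → Nat → Int → Int → Option (Nat × Int)
  | 0, _, _, _ => none
  | n+1, i, slow, fast =>
    if altStep M slow = altStep M (altStep M fast) then some (i + 1, altStep M slow)
    else altPhase1 M n (i + 1) (altStep M slow) (altStep M (altStep M fast))

-- phase 2: find mu walking from X and from the meeting value in lockstep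
-- (the fuel only makes the Python 'while' total; it is never exhausted)
def altMu (M : Int) : Nat → Nat → Int → Int → Nat × Int
  | 0, mu, p, _ => (mu, p)
  | n+1, mu, p, q => if p = q then (mu, p) else altMu M n (mu + 1) (altStep M p) (altStep M q)

-- phase 3: cycle length, walking once around from p
def altLam (M : Int) : Nat → Nat → Int → Int → Nat
  | 0, lam, _, _ => lam
  | n+1, lam, p, v => if v = p then lam else altLam M n (lam + 1) p (altStep M v)

-- 'total += v; v = step(v)' summing loop; returns (sum, final v)
def altSumRun (M : Int) : Nat → Int → Int → Int × Int
  | 0, v, acc => (acc, v)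
  | n+1, v, acc => altSumRun M n (altStep M v) (acc + v)

def solve_alt (N : Int) (X : Int) (M : Int) : Int :=
  match altPhase1 M N.toNat 0 X X with
  | none => (altSumRun M N.toNat X 0).1
  | some (nu, s) =>
    let mp := altMu M (nu + 1) 0 X s
    let mu := mp.1
    let p := mp.2
    let lam := altLam M nu 1 p (altStep M p)
    let tv := altSumRun M mu X 0
    let tail := tv.1
    let v := tv.2
    let cycleSum := (altSumRun M lam v 0).1
    let rem := N - (mu : Int)
    let part := (altSumRun M (PySem.Int.mod rem (lam : Int)).toNat v 0).1
    tail + cycleSum * PySem.Int.floordiv rem (lam : Int) + part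

-- ===== PRECONDITION & SPEC =====
-- Pre_ excludes M = 0 (A raises ZeroDivisionError) and negative N (a negative
-- number of terms is outside the task's natural domain; A's value N*X there is
-- an artefact of its final slice arithmetic).
def Pre_solve (N : Int) (X : Int) (M : Int) : Prop := 0 ≤ N ∧ M ≠ 0
instance (N : Int) (X : Int) (M : Int) : Decidable (Pre_solve N X M) := by unfold Pre_solve; infer_instance
def pvWitness_solve : Int × Int × Int := (10, 2, 1000)

def Spec_solve (N : Int) (X : Int) (M : Int) (out : Int) : Prop := out = solve_alt N X M
instance (N : Int) (X : Int) (M : Int) (out : Int) : Decidable (Spec_solve N X M out) := by unfold Spec_solve; infer_instance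

-- ===== CLAIM (what is proved, stated in full; the proofs are below) =====
def Claim_equal_solve : Prop := ∀ (N : Int) (X : Int) (M : Int), Dom_solve N X M → Pre_solve N X M → Spec_solve N X M (solve N X M)

-- ===== LEMMAS AND PROOFS =====

-- the orbit A_0 = X, A_{k+1} = A_k^2 % M, and its window sums
def orbit (M X : Int) : Nat → Int
  | 0 => X
  | k+1 => PySem.Int.mod ((orbit M X k) ^ 2) M

def W (M X : Int) (a b : Nat) : Int := ∑ i ∈ Finset.Ico a b, orbit M X i

theorem altStep_orbit (M X : Int) (k : Nat) : altStep M (orbit M X k) = orbit M X (k+1) := by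
  simp [altStep, orbit, sq]

theorem W_split (M X : Int) (a b c : Nat) (h1 : a ≤ b) (h2 : b ≤ c) :
    W M X a c = W M X a b + W M X b c := by
  unfold W; rw [Finset.sum_Ico_consecutive _ h1 h2]

theorem orbit_shift (M X : Int) {m l : Nat} (hper : orbit M X (m + l) = orbit M X m) :
    ∀ d, orbit M X (m + d + l) = orbit M X (m + d) := by
  intro d; induction d with
  | zero => simpa using hper
  | succ d ih =>
      have e1 : m + (d+1) + l = (m + d + l) + 1 := by omega
      have e2 : m + (d+1) = (m + d) + 1 := by omega
      rw [e1, e2]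
      show orbit M X ((m + d + l) + 1) = orbit M X ((m+d)+1)
      simp [orbit, ih]

theorem orbit_shift' (M X : Int) {m l i : Nat} (hper : orbit M X (m + l) = orbit M X m)
    (hi : m ≤ i) : orbit M X (i + l) = orbit M X i := by
  have := orbit_shift M X hper (i - m)
  have e : m + (i - m) = i := by omega
  rwa [e] at this

theorem W_shift (M X : Int) {m l a b : Nat} (hper : orbit M X (m + l) = orbit M X m)
    (ha : m ≤ a) : W M X (a + l) (b + l) = W M X a b := by
  unfold W
  rw [Finset.sum_Ico_eq_sum_range, Finset.sum_Ico_eq_sum_range]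
  have e : b + l - (a + l) = b - a := by omega
  rw [e]
  refine Finset.sum_congr rfl ?_
  intro i _
  have e2 : a + l + i = (a + i) + l := by omega
  rw [e2, orbit_shift' M X hper (by omega)]

theorem W_cycles (M X : Int) {m l : Nat} (hper : orbit M X (m + l) = orbit M X m) :
    ∀ q r, W M X m (m + (q * l + r)) = (q : Int) * W M X m (m + l) + W M X m (m + r) := by
  intro q; induction q with
  | zero => intro r; simp
  | succ q ih =>
      intro r
      have e : m + ((q+1) * l + r) = (m + l) + (q * l + r) := by ring
      rw [e, W_split M X m (m + l) (m + l + (q * l + r)) (by omega) (by omega)]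
      have e2 : m + l + (q * l + r) = (m + (q * l + r)) + l := by omega
      rw [e2, W_shift M X hper (le_refl m), ih r]
      push_cast; ring

theorem periodic_sum (M X : Int) {m l n : Nat} (_hl : 1 ≤ l)
    (hper : orbit M X (m + l) = orbit M X m) (hmn : m ≤ n) :
    W M X 0 n = W M X 0 m + W M X m (m + l) * (((n - m) / l : Nat) : Int)
      + W M X m (m + (n - m) % l) := by
  have hdm : (n - m) / l * l + (n - m) % l = n - m := Nat.div_add_mod' (n - m) l
  have h2 := W_cycles M X hper ((n - m) / l) ((n - m) % l)
  rw [show m + ((n - m) / l * l + (n - m) % l) = n from by rw [hdm]; omega] at h2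
  rw [W_split M X 0 m n (Nat.zero_le m) hmn, h2]; ring


theorem orbit_succ (M X : Int) (k : Nat) : orbit M X (k+1) = PySem.Int.mod ((orbit M X k) ^ 2) M := rfl

theorem sum_map_range (M X : Int) : ∀ n : Nat, ((List.range n).map (orbit M X)).sum = W M X 0 n := by
  intro n; induction n with
  | zero => simp [W]
  | succ n ih =>
      rw [List.range_succ, List.map_append, List.sum_append, ih]
      unfold W
      rw [Finset.sum_Ico_succ_top (Nat.zero_le _)]
      simp

theorem sum_take (M X : Int) {s L : Nat} (h : s ≤ L) :
    (((List.range L).map (orbit M X)).take s).sum = W M X 0 s := by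
  rw [← List.map_take, List.take_range, Nat.min_eq_left h, sum_map_range]

theorem sum_drop (M X : Int) {s L : Nat} (h : s ≤ L) :
    (((List.range L).map (orbit M X)).drop s).sum = W M X s L := by
  have h1 := List.sum_take_add_sum_drop ((List.range L).map (orbit M X)) s
  rw [sum_take M X h, sum_map_range] at h1
  have h2 := W_split M X 0 s L (Nat.zero_le _) h
  omega

theorem sum_take_drop (M X : Int) {s r L : Nat} (h : s + r ≤ L) :
    ((((List.range L).map (orbit M X)).drop s).take r).sum = W M X s (s+r) := by
  rw [List.take_drop]
  have h1 := List.sum_take_add_sum_drop (((List.range L).map (orbit M X)).take (s+r)) s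
  rw [List.take_take, Nat.min_eq_left (by omega)] at h1
  rw [sum_take M X h, sum_take M X (by omega)] at h1
  have h2 := W_split M X 0 s (s+r) (by omega) (by omega)
  omega

theorem altSumRun_spec (M X : Int) : ∀ (n k : Nat) (acc : Int),
    altSumRun M n (orbit M X k) acc = (acc + W M X k (k + n), orbit M X (k + n)) := by
  intro n; induction n with
  | zero => intro k acc; simp [altSumRun, W]
  | succ n ih =>
      intro k acc
      rw [altSumRun, altStep_orbit, ih (k+1)]
      have e1 : k + (n+1) = (k+1) + n := by omega
      rw [e1]
      have e2 : acc + W M X k ((k+1)+n) = acc + orbit M X k + W M X (k+1) ((k+1)+n) := by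
        rw [show W M X k ((k+1)+n) = orbit M X k + W M X (k+1) ((k+1)+n) from by
          unfold W; rw [Finset.sum_eq_sum_Ico_succ_bot (by omega)]]
        ring
      rw [e2]

theorem phase1_spec (M X : Int) : ∀ (fuel i : Nat),
    altPhase1 M fuel i (orbit M X i) (orbit M X (i+i)) = none ∨
    ∃ ν, i < ν ∧ ν ≤ i + fuel ∧
      altPhase1 M fuel i (orbit M X i) (orbit M X (i+i)) = some (ν, orbit M X ν) ∧
      orbit M X ν = orbit M X (ν+ν) := by
  intro fuel; induction fuel with
  | zero => intro i; left; rfl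
  | succ fuel ih =>
      intro i
      rw [altPhase1, altStep_orbit, altStep_orbit, altStep_orbit,
        show i + i + 1 + 1 = (i+1) + (i+1) from by omega]
      by_cases he : orbit M X (i+1) = orbit M X ((i+1)+(i+1))
      · right
        exact ⟨i+1, by omega, by omega, by rw [if_pos he], he⟩
      · rw [if_neg he]
        rcases ih (i+1) with h | ⟨ν, h1, h2, h3, h4⟩
        · left; exact h
        · right; exact ⟨ν, by omega, by omega, h3, h4⟩

theorem mu_spec (M X : Int) {ν : Nat} (hν : orbit M X ν = orbit M X (ν+ν)) :
    ∀ (fuel mu : Nat), mu ≤ ν → ν + 1 ≤ mu + fuel →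
    ∃ m, mu ≤ m ∧ m ≤ ν ∧
      altMu M fuel mu (orbit M X mu) (orbit M X (mu+ν)) = (m, orbit M X m) ∧
      orbit M X (m+ν) = orbit M X m := by
  intro fuel; induction fuel with
  | zero => intro mu h1 h2; omega
  | succ fuel ih =>
      intro mu h1 h2
      by_cases he : orbit M X mu = orbit M X (mu+ν)
      · exact ⟨mu, le_refl _, h1, by rw [altMu, if_pos he], he.symm⟩
      · have hlt : mu < ν := by
          rcases Nat.lt_or_ge mu ν with h | h
          · exact h
          · exfalso; have : mu = ν := by omega
            subst this; exact he hν
        obtain ⟨m, hm1, hm2, hm3, hm4⟩ := ih (mu+1) (by omega) (by omega)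
        refine ⟨m, by omega, hm2, ?_, hm4⟩
        rw [altMu, if_neg he, altStep_orbit, altStep_orbit,
          show mu + ν + 1 = (mu+1) + ν from by omega]
        exact hm3

theorem lam_spec (M X : Int) {m ν : Nat} (hm : orbit M X (m+ν) = orbit M X m) :
    ∀ (fuel lam : Nat), 1 ≤ lam → lam ≤ ν → ν < lam + fuel →
    ∃ l, lam ≤ l ∧ l ≤ ν ∧ altLam M fuel lam (orbit M X m) (orbit M X (m+lam)) = l ∧
      orbit M X (m+l) = orbit M X m := by
  intro fuel; induction fuel with
  | zero => intro lam h1 h2 h3; omega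
  | succ fuel ih =>
      intro lam h1 h2 h3
      by_cases he : orbit M X (m+lam) = orbit M X m
      · exact ⟨lam, le_refl _, h2, by rw [altLam, if_pos he], he⟩
      · have hlt : lam < ν := by
          rcases Nat.lt_or_ge lam ν with h | h
          · exact h
          · exfalso; have : lam = ν := by omega
            subst this; exact he hm
        obtain ⟨l, hl1, hl2, hl3, hl4⟩ := ih (lam+1) (by omega) (by omega) (by omega)
        refine ⟨l, by omega, hl2, ?_, hl4⟩
        rw [altLam, if_neg he, altStep_orbit,
          show m + lam + 1 = m + (lam+1) from by omega]
        exact hl3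

theorem loop1_spec (M X : Int) : ∀ (n k : Nat),
    ∃ j, k ≤ j ∧ j ≤ k + n ∧
      solveLoop1 M n (orbit M X k) ((List.range (k+1)).map (orbit M X)) ((List.range (k+1)).map (orbit M X))
        = (List.range (j+1)).map (orbit M X) ∧
      (j = k + n ∨ (orbit M X (j+1) ∈ (List.range (j+1)).map (orbit M X) ∧ j < k + n)) := by
  intro n; induction n with
  | zero => intro k; exact ⟨k, le_refl _, by omega, rfl, Or.inl (by omega)⟩
  | succ n ih =>
      intro k
      rw [solveLoop1, ← orbit_succ]
      by_cases hmem : orbit M X (k+1) ∈ (List.range (k+1)).map (orbit M X)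
      · exact ⟨k, le_refl _, by omega, by rw [if_pos hmem], Or.inr ⟨hmem, by omega⟩⟩
      · obtain ⟨j, hj1, hj2, hj3, hj4⟩ := ih (k+1)
        refine ⟨j, by omega, by omega, ?_, ?_⟩
        swap
        · rcases hj4 with h | ⟨h, h2⟩
          · exact Or.inl (by omega)
          · exact Or.inr ⟨h, by omega⟩
        rw [if_neg hmem]
        have hset : PySem.Set.add ((List.range (k+1)).map (orbit M X)) (orbit M X (k+1))
            = (List.range (k+1)).map (orbit M X) ++ [orbit M X (k+1)] := by
          simp [PySem.Set.add, PySem.Set.contains, hmem]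
        have hrange : (List.range (k+1)).map (orbit M X) ++ [orbit M X (k+1)]
            = (List.range (k+2)).map (orbit M X) := by
          simp [List.range_succ]
        rw [hset, hrange]
        exact hj3

theorem scan_bound (t : Int) : ∀ (ys : List Int) (i : Int), 0 ≤ i →
    ∃ s : Nat, solveScan t ys i = (s : Int) ∧ ((s : Int) < i + ys.length ∨ s = 0) := by
  intro ys; induction ys with
  | nil => intro i hi; exact ⟨0, rfl, Or.inr rfl⟩
  | cons y ys ih =>
      intro i hi
      rw [solveScan]
      by_cases h : y = t
      · refine ⟨i.toNat, by rw [if_pos h]; omega, Or.inl ?_⟩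
        simp; omega
      · obtain ⟨s, hs, hb⟩ := ih (i+1) (by omega)
        rw [if_neg h]
        refine ⟨s, hs, ?_⟩
        rcases hb with h2 | h2
        · left; simp; omega
        · right; exact h2

theorem scan_found (t : Int) : ∀ (ys : List Int) (i : Int), t ∈ ys →
    ∃ p : Nat, solveScan t ys i = i + (p : Int) ∧ ys[p]? = some t := by
  intro ys; induction ys with
  | nil => intro i hmem; simp at hmem
  | cons y ys ih =>
      intro i hmem
      rw [solveScan]
      by_cases h : y = t
      · exact ⟨0, by rw [if_pos h]; omega, by simp [h]⟩
      · have hmem2 : t ∈ ys := by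
          rcases List.mem_cons.mp hmem with h2 | h2
          · exact absurd h2.symm h
          · exact h2
        obtain ⟨p, hp1, hp2⟩ := ih (i+1) hmem2
        refine ⟨p+1, by rw [if_neg h, hp1]; push_cast; ring, by simpa using hp2⟩


theorem B_eq (N X M : Int) (hN : 0 ≤ N) : solve_alt N X M = W M X 0 N.toNat := by
  have hNn : N = (N.toNat : Int) := (Int.toNat_of_nonneg hN).symm
  unfold solve_alt
  rcases phase1_spec M X N.toNat 0 with h | ⟨ν, h1, h2, h3, h4⟩
  · simp only [show orbit M X 0 = X from rfl, Nat.add_zero] at h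
    rw [h]
    have hs := altSumRun_spec M X N.toNat 0 0
    simp only [show orbit M X 0 = X from rfl, Nat.zero_add] at hs
    rw [hs]
    simp
  · simp only [show orbit M X 0 = X from rfl, Nat.add_zero] at h3
    rw [h3]
    obtain ⟨m, hm1, hm2, hm3, hm4⟩ := mu_spec M X h4 (ν+1) 0 (by omega) (by omega)
    simp only [show orbit M X 0 = X from rfl, Nat.zero_add] at hm3
    obtain ⟨l, hl1, hl2, hl3, hl4⟩ := lam_spec M X hm4 ν 1 (by omega) (by omega) (by omega)
    have hrun1 := altSumRun_spec M X m 0 0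
    simp only [show orbit M X 0 = X from rfl, Nat.zero_add] at hrun1
    have hrun2 := altSumRun_spec M X l m 0
    have hrun3 := altSumRun_spec M X ((N.toNat - m) % l) m 0
    have hrem : N - (m : Int) = ((N.toNat - m : Nat) : Int) := by omega
    simp only [hm3, altStep_orbit, hl3, hrun1, hrun2, hrun3, hrem,
      PySem.Int.floordiv_natCast, PySem.Int.mod_natCast, Int.toNat_natCast]
    simp only [zero_add]
    exact (periodic_sum M X hl1 hl4 (by omega)).symm


theorem formula_eval (M X : Int) {L s n : Nat} (hsL : s < L) (hsn : s ≤ n) :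
    (PySem.List.slice ((List.range L).map (orbit M X)) none (some (s:Int))).sum
    + ((PySem.List.slice ((List.range L).map (orbit M X)) (some (s:Int)) none).sum
        * PySem.Int.floordiv ((n:Int) - (s:Int)) ((L:Int) - (s:Int))
      + (PySem.List.slice ((List.range L).map (orbit M X)) (some (s:Int))
          (some ((s:Int) + PySem.Int.mod ((n:Int) - (s:Int)) ((L:Int) - (s:Int))))).sum)
    = W M X 0 s + (W M X s L * (((n-s)/(L-s) : Nat) : Int) + W M X s (s + (n-s) % (L-s))) := by
  have hr : (n-s) % (L-s) < L - s := Nat.mod_lt _ (by omega)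
  have e1 : (n:Int) - (s:Int) = ((n - s : Nat) : Int) := by omega
  have e2 : (L:Int) - (s:Int) = ((L - s : Nat) : Int) := by omega
  rw [e1, e2, PySem.Int.floordiv_natCast, PySem.Int.mod_natCast,
    PySem.List.slice_to_natCast, PySem.List.slice_from_natCast,
    show (s:Int) + (((n-s)%(L-s) : Nat) : Int) = ((s + (n-s)%(L-s) : Nat) : Int) from by push_cast; ring,
    PySem.List.slice_natCast,
    show s + (n-s)%(L-s) - s = (n-s)%(L-s) from by omega,
    sum_take M X (by omega), sum_drop M X (by omega), sum_take_drop M X (by omega)]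

theorem A_eq (N X M : Int) (hN : 0 ≤ N) : solve N X M = W M X 0 N.toNat := by
  have hNn : N = (N.toNat : Int) := (Int.toNat_of_nonneg hN).symm
  obtain ⟨j, hj0, hjn, hLoop, hbr⟩ := loop1_spec M X N.toNat 0
  simp only [Nat.zero_add] at hjn hbr
  have hinit : solveLoop1 M N.toNat X [X] (PySem.Set.ofList [X])
      = solveLoop1 M N.toNat (orbit M X 0) ((List.range 1).map (orbit M X))
          ((List.range 1).map (orbit M X)) := by
    simp [PySem.Set.ofList, PySem.Set.add, PySem.Set.contains, List.range_one, orbit]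
  have hlast : PySem.List.pyGet? ((List.range (j+1)).map (orbit M X)) (-1)
      = some (orbit M X j) := by
    rw [PySem.List.pyGet?_neg_one, List.range_succ]
    simp
  simp only [Nat.zero_add] at hLoop
  unfold solve
  rw [hinit, hLoop]
  simp only [hlast, Option.getD_some, ← orbit_succ, List.length_map, List.length_range]
  rcases hbr with hb | ⟨hmem, hlt⟩
  · -- no break within N steps: L = N.toNat + 1
    subst hb
    obtain ⟨s, hscan, hsb⟩ := scan_bound (orbit M X (N.toNat+1))
      ((List.range (N.toNat+1)).map (orbit M X)) 0 (le_refl 0)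
    have hsn : s ≤ N.toNat := by
      rcases hsb with h | h
      · simp at h; omega
      · omega
    rw [hscan, hNn, formula_eval M X (by omega) hsn]
    simp only [Int.toNat_natCast]
    rw [Nat.div_eq_of_lt (by omega), Nat.mod_eq_of_lt (by omega),
      show s + (N.toNat - s) = N.toNat from by omega]
    have hw := W_split M X 0 s N.toNat (by omega) hsn
    simp only [Nat.cast_zero, mul_zero, zero_add]
    omega
  · -- break: orbit (j+1) occurs among the first j+1 terms
    obtain ⟨p, hscan, hp⟩ := scan_found (orbit M X (j+1))
      ((List.range (j+1)).map (orbit M X)) 0 hmem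
    simp only [zero_add] at hscan
    obtain ⟨hpL, hpv⟩ := List.getElem?_eq_some_iff.mp hp
    simp only [List.length_map, List.length_range] at hpL
    rw [List.getElem_map, List.getElem_range] at hpv
    have hper : orbit M X (p + (j + 1 - p)) = orbit M X p := by
      rw [show p + (j + 1 - p) = j + 1 from by omega, ← hpv]
    rw [hscan, hNn, formula_eval M X (n := N.toNat) hpL (by omega)]
    rw [show W M X p (j+1) = W M X p (p + (j + 1 - p)) from by rw [show p + (j+1-p) = j+1 from by omega]]
    simp only [Int.toNat_natCast]
    rw [← add_assoc]
    exact (periodic_sum M X (m := p) (l := j+1-p) (n := N.toNat) (by omega) hper (by omega)).symm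

-- ===== VERDICT (by name: the statement is the Claim_ definition above) =====
theorem solve_spec : Claim_equal_solve := by
  intro N X M _ hpre
  unfold Spec_solve
  rw [A_eq N X M hpre.1, B_eq N X M hpre.1]
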